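-- pv_equiv track=rewrite | github.com/nehraa/Learning_AI | rfai/ai/plan_generator.py | _estimate_duration
-- ===== SOURCE A (Python) =====
-- from typing import Dict, List, Optional
--
-- def _estimate_duration(topic: str, context: Dict) -> int:
--     """
--     Dynamically estimate learning duration based on topic and user context
--     Not everything needs 52 weeks - fast learners need less time
--     """
--     # Check explicit timeline
--     timeline = context.get("timeline", "")
--     if "week" in timeline:
--         return min(int(timeline.split()[0]), 52)
--     elif "month" in timeline:
--         return min(int(timeline.split()[0]) * 4, 52)
--
--     # Estimate based on topic complexity
--     topic_lower = topic.lower()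
--
--     # Quick skills (2-8 weeks)
--     quick_topics = ["git", "markdown", "bash", "sql basics", "html", "css"]
--     if any(quick in topic_lower for quick in quick_topics):
--         return 4  # 1 month
--
--     # Medium complexity (8-16 weeks)
--     medium_topics = ["python basics", "javascript", "react", "flask", "django basics"]
--     if any(medium in topic_lower for medium in medium_topics):
--         return 12  # 3 months
--
--     # Advanced topics (16-26 weeks)
--     advanced_topics = ["machine learning", "algorithms", "system design", "quantum"]
--     if any(adv in topic_lower for adv in advanced_topics):
--         base_weeks = 20  # 5 months
--         # Adjust for learning speed
--         current_knowledge = context.get("current_knowledge", "beginner")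
--         if current_knowledge in ["intermediate", "advanced"]:
--             return int(base_weeks * 0.7)  # 14 weeks for experienced
--         return base_weeks
--
--     # Very advanced (26-40 weeks)
--     expert_topics = ["quantum mechanics", "category theory", "advanced mathematics",
--                     "compiler design", "distributed systems"]
--     if any(exp in topic_lower for exp in expert_topics):
--         base_weeks = 32  # 8 months
--         # Adjust for learning speed
--         current_knowledge = context.get("current_knowledge", "beginner")
--         if current_knowledge in ["intermediate", "advanced"]:
--             return int(base_weeks * 0.7)  # 22 weeks for experienced
--         return base_weeks
--
--     # Default: moderate duration
--     current_knowledge = context.get("current_knowledge", "beginner")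
--     if current_knowledge in ["intermediate", "advanced"]:
--         return 8  # Experienced learner, unknown topic
--     return 12  # 3 months for average topic
-- ===== SOURCE B (Python) =====
-- def _estimate_duration(topic: str, context: dict) -> int:
--     """
--     Flat keyword->tier map with min-aggregation instead of an ordered branch
--     chain: collect the tiers of ALL matching keywords, take the smallest
--     (tiers are numbered in A's check order, so min = first matching tier),
--     and read the answer off a (tier, experienced) result table.
--     """
--     timeline = context.get("timeline", "")
--     for unit, mult in (("week", 1), ("month", 4)):
--         if unit in timeline:
--             return min(int(timeline.split()[0]) * mult, 52)
--
--     tier_of = {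
--         "git": 0, "markdown": 0, "bash": 0, "sql basics": 0, "html": 0, "css": 0,
--         "python basics": 1, "javascript": 1, "react": 1, "flask": 1, "django basics": 1,
--         "machine learning": 2, "algorithms": 2, "system design": 2, "quantum": 2,
--         "quantum mechanics": 3, "category theory": 3, "advanced mathematics": 3,
--         "compiler design": 3, "distributed systems": 3,
--     }
--     topic_lower = topic.lower()
--     tier = min((t for kw, t in tier_of.items() if kw in topic_lower), default=4)
--
--     experienced = context.get("current_knowledge", "beginner") in ("intermediate", "advanced")
--     table = ((4, 4), (12, 12), (20, 14), (32, 22), (12, 8))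
--     return table[tier][experienced]
-- ===== Notes on version B (the rewrite author's own statement) =====
-- stated objective: alternative
-- what changed: Replaces A's ordered chain of topic branches (each with its own duplicated knowledge-adjustment block) by a flat keyword-to-tier map aggregated with min over ALL matching keywords (min of tiers numbered in A's check order equals the first matching tier) and a (tier, experienced) result table lookup; the timeline special-case becomes a loop over (unit, multiplier) pairs.
import Mathlib
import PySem

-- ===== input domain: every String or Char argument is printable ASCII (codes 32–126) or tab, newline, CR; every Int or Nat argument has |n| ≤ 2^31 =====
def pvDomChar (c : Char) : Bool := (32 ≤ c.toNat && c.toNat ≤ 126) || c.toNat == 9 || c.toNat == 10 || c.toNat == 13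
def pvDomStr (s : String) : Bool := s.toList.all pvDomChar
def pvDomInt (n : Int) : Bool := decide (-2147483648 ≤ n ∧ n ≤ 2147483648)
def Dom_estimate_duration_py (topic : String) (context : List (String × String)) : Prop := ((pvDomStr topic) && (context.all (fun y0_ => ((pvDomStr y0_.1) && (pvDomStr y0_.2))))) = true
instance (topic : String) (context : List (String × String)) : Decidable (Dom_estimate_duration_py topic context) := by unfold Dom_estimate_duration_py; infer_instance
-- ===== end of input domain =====

-- B replaces A's ordered branch chain by a flat keyword->tier map: it collects the
-- tiers of ALL matching keywords, takes the minimum, and reads the answer off a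
-- (tier, experienced) result table (objective: alternative).


-- ===== PORT A =====
-- literal port of _estimate_duration; where Python raises (IndexError/ValueError in the
-- timeline parse) the port returns 0 — those inputs are excluded by Pre_.
-- int(20*0.7) = 14 and int(32*0.7) = 22 in IEEE double; ported as those literals.
def estimate_duration_py (topic : String) (context : List (String × String)) : Int :=
  let timeline := (PySem.Dict.mk context).getD "timeline" ""
  if PySem.Str.isIn "week" timeline then
    match (PySem.Str.split₀ timeline).head?.bind PySem.Int.ofStr? with
    | some n => min n 52
    | none => 0   -- Python raises here; outside Pre_
  else if PySem.Str.isIn "month" timeline then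
    match (PySem.Str.split₀ timeline).head?.bind PySem.Int.ofStr? with
    | some n => min (n * 4) 52
    | none => 0   -- Python raises here; outside Pre_
  else
    let topic_lower := PySem.Str.lower topic
    let quick_topics := ["git", "markdown", "bash", "sql basics", "html", "css"]
    if quick_topics.any (fun q => PySem.Str.isIn q topic_lower) then 4
    else
      let medium_topics := ["python basics", "javascript", "react", "flask", "django basics"]
      if medium_topics.any (fun m => PySem.Str.isIn m topic_lower) then 12
      else
        let advanced_topics := ["machine learning", "algorithms", "system design", "quantum"]
        if advanced_topics.any (fun a => PySem.Str.isIn a topic_lower) then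
          let base_weeks : Int := 20
          let current_knowledge := (PySem.Dict.mk context).getD "current_knowledge" "beginner"
          if ["intermediate", "advanced"].contains current_knowledge then 14
          else base_weeks
        else
          let expert_topics := ["quantum mechanics", "category theory", "advanced mathematics",
                                "compiler design", "distributed systems"]
          if expert_topics.any (fun e => PySem.Str.isIn e topic_lower) then
            let base_weeks : Int := 32
            let current_knowledge := (PySem.Dict.mk context).getD "current_knowledge" "beginner"
            if ["intermediate", "advanced"].contains current_knowledge then 22
            else base_weeks
          else
            let current_knowledge := (PySem.Dict.mk context).getD "current_knowledge" "beginner"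
            if ["intermediate", "advanced"].contains current_knowledge then 8
            else 12

-- ===== PORT B =====
-- Source B's timeline loop: first unit substring found decides; none = fall through
def edpTimeline (units : List (String × Int)) (timeline : String) : Option Int :=
  match units with
  | [] => none
  | (u, m) :: rest =>
    if PySem.Str.isIn u timeline then
      some (match (PySem.Str.split₀ timeline).head?.bind PySem.Int.ofStr? with
            | some n => min (n * m) 52
            | none => 0)   -- Python raises here; outside Pre_
    else edpTimeline rest timeline

-- Source B's min(... , default=4): fold min over the tiers of the matching keywords
def edpMinTier (pairs : List (String × Int)) (topic_lower : String) : Int :=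
  pairs.foldl (fun acc p => if PySem.Str.isIn p.1 topic_lower then min acc p.2 else acc) 4

def edpTierOf : List (String × Int) :=
  [("git", 0), ("markdown", 0), ("bash", 0), ("sql basics", 0), ("html", 0), ("css", 0),
   ("python basics", 1), ("javascript", 1), ("react", 1), ("flask", 1), ("django basics", 1),
   ("machine learning", 2), ("algorithms", 2), ("system design", 2), ("quantum", 2),
   ("quantum mechanics", 3), ("category theory", 3), ("advanced mathematics", 3),
   ("compiler design", 3), ("distributed systems", 3)]

def edpTable : List (Int × Int) := [(4, 4), (12, 12), (20, 14), (32, 22), (12, 8)]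

def estimate_duration_py_alt (topic : String) (context : List (String × String)) : Int :=
  let timeline := (PySem.Dict.mk context).getD "timeline" ""
  match edpTimeline [("week", 1), ("month", 4)] timeline with
  | some v => v
  | none =>
    let tier := edpMinTier edpTierOf (PySem.Str.lower topic)
    let experienced := ["intermediate", "advanced"].contains
      ((PySem.Dict.mk context).getD "current_knowledge" "beginner")
    let pair := (PySem.List.pyGet? edpTable tier).getD (0, 0)  -- tier ∈ [0,4]: always in range
    if experienced then pair.2 else pair.1

-- ===== PRECONDITION & SPEC =====
-- Pre_ excludes exactly the inputs where A raises: a timeline containing "week" or "month"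
-- whose first whitespace-token is missing or not an int() literal (IndexError/ValueError).
def Pre_estimate_duration_py (topic : String) (context : List (String × String)) : Prop :=
  let t := (PySem.Dict.mk context).getD "timeline" ""
  (PySem.Str.isIn "week" t || PySem.Str.isIn "month" t) = true →
    ((PySem.Str.split₀ t).head?.bind PySem.Int.ofStr?).isSome = true
instance (topic : String) (context : List (String × String)) : Decidable (Pre_estimate_duration_py topic context) := by unfold Pre_estimate_duration_py; infer_instance

def pvWitness_estimate_duration_py : String × (List (String × String)) :=
  ("machine learning", [("timeline", "6 weeks")])

def Spec_estimate_duration_py (topic : String) (context : List (String × String)) (out : Int) : Prop := out = estimate_duration_py_alt topic context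
instance (topic : String) (context : List (String × String)) (out : Int) : Decidable (Spec_estimate_duration_py topic context out) := by unfold Spec_estimate_duration_py; infer_instance

-- ===== CLAIM (what is proved, stated in full; the proofs are below) =====
def Claim_equal_estimate_duration_py : Prop := ∀ (topic : String) (context : List (String × String)), Dom_estimate_duration_py topic context → Pre_estimate_duration_py topic context → Spec_estimate_duration_py topic context (estimate_duration_py topic context)

-- ===== LEMMAS AND PROOFS =====

-- folding the min-accumulator over the keywords of ONE tier: matches ⇒ min in, else unchanged
theorem edp_fold_const (tl : String) (t a : Int) (kws : List String) :
    (kws.map (fun k => (k, t))).foldl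
      (fun acc p => if PySem.Str.isIn p.1 tl then min acc p.2 else acc) a
    = if kws.any (fun k => PySem.Str.isIn k tl) then min a t else a := by
  induction kws generalizing a with
  | nil => simp
  | cons k rest ih =>
    rw [List.map_cons, List.foldl_cons, List.any_cons]
    by_cases hk : PySem.Str.isIn k tl = true
    · rw [if_pos hk, ih]
      simp only [hk, Bool.true_or, if_true]
      by_cases hr : (rest.any fun k => PySem.Str.isIn k tl) = true
      · rw [if_pos hr, min_assoc, min_self]
      · rw [if_neg hr]
    · rw [if_neg hk, ih]
      have hb : PySem.Str.isIn k tl = false := by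
        cases h : PySem.Str.isIn k tl
        · rfl
        · exact absurd h hk
      simp only [hb, Bool.false_or]

-- the min over the flat tier map = the first tier (in order 0..3) with a match, else 4
theorem edp_minTier (tl : String) :
    edpMinTier edpTierOf tl
    = (if ["git", "markdown", "bash", "sql basics", "html", "css"].any (fun q => PySem.Str.isIn q tl) then (0 : Int)
       else if ["python basics", "javascript", "react", "flask", "django basics"].any (fun m => PySem.Str.isIn m tl) then 1
       else if ["machine learning", "algorithms", "system design", "quantum"].any (fun a => PySem.Str.isIn a tl) then 2
       else if ["quantum mechanics", "category theory", "advanced mathematics",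
                "compiler design", "distributed systems"].any (fun e => PySem.Str.isIn e tl) then 3
       else 4) := by
  have hsplit : edpTierOf
      = (["git", "markdown", "bash", "sql basics", "html", "css"].map (fun k => (k, (0:Int))))
        ++ (["python basics", "javascript", "react", "flask", "django basics"].map (fun k => (k, (1:Int))))
        ++ (["machine learning", "algorithms", "system design", "quantum"].map (fun k => (k, (2:Int))))
        ++ (["quantum mechanics", "category theory", "advanced mathematics",
             "compiler design", "distributed systems"].map (fun k => (k, (3:Int)))) := by
    rfl
  unfold edpMinTier
  rw [hsplit, List.foldl_append, List.foldl_append, List.foldl_append,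
      edp_fold_const, edp_fold_const, edp_fold_const, edp_fold_const]
  split_ifs <;> omega

-- the topic-complexity tail of A equals B's table lookup at the min tier
theorem edp_tail (tl ck : String) :
    (if ["git", "markdown", "bash", "sql basics", "html", "css"].any (fun q => PySem.Str.isIn q tl) then (4 : Int)
     else if ["python basics", "javascript", "react", "flask", "django basics"].any (fun m => PySem.Str.isIn m tl) then 12
     else if ["machine learning", "algorithms", "system design", "quantum"].any (fun a => PySem.Str.isIn a tl) then
       if ["intermediate", "advanced"].contains ck then 14 else 20
     else if ["quantum mechanics", "category theory", "advanced mathematics",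
              "compiler design", "distributed systems"].any (fun e => PySem.Str.isIn e tl) then
       if ["intermediate", "advanced"].contains ck then 22 else 32
     else if ["intermediate", "advanced"].contains ck then 8 else 12)
    = (let pair := (PySem.List.pyGet? edpTable (edpMinTier edpTierOf tl)).getD (0, 0)
       if ["intermediate", "advanced"].contains ck then pair.2 else pair.1) := by
  rw [edp_minTier]
  split_ifs <;> rfl

-- ===== VERDICT (by name: the statement is the Claim_ definition above) =====
theorem estimate_duration_py_spec : Claim_equal_estimate_duration_py := by
  intro topic context _ _
  unfold Spec_estimate_duration_py
  simp only [estimate_duration_py, estimate_duration_py_alt, edpTimeline]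
  by_cases hw : (PySem.Str.isIn "week" ((PySem.Dict.mk context).getD "timeline" "")) = true
  · rw [if_pos hw, if_pos hw]
    cases (PySem.Str.split₀ ((PySem.Dict.mk context).getD "timeline" "")).head?.bind PySem.Int.ofStr? with
    | none => rfl
    | some n => show min n 52 = min (n * 1) 52; rw [mul_one]
  · rw [if_neg hw, if_neg hw]
    by_cases hm : (PySem.Str.isIn "month" ((PySem.Dict.mk context).getD "timeline" "")) = true
    · rw [if_pos hm, if_pos hm]
    · rw [if_neg hm, if_neg hm]
      exact edp_tail (PySem.Str.lower topic) ((PySem.Dict.mk context).getD "current_knowledge" "beginner")
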